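-- pv_equiv track=rewrite | github.com/tiro-agent/tiro-agent | web_agent/agent/actions.py | _parse_comma_separated_params
-- ===== SOURCE A (Python) =====
-- def _parse_comma_separated_params(param_str: str) -> list[str]:
-- 	"""Parse a comma-separated parameter string, handling quoted strings that may contain commas and named parameters."""
-- 	result = []
-- 	current = ''
-- 	in_quotes = False
-- 	quote_char = None
-- 	for char in param_str:
-- 		if char in ['"', "'"]:
-- 			if not in_quotes:
-- 				in_quotes = True
-- 				quote_char = char
-- 			elif char == quote_char:
-- 				in_quotes = False
-- 			current += char
-- 		elif char == ',' and not in_quotes: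
-- 			result.append(current.strip())
-- 			current = ''
-- 		else:
-- 			current += char
-- 	if current:
-- 		result.append(current.strip())
-- 	return result
-- ===== SOURCE B (Python) =====
-- def _parse_comma_separated_params(param_str: str) -> list[str]:
--     """Two-phase: record the indices of unquoted commas, then slice the string between them."""
--     splits = []
--     in_quotes = False
--     quote_char = None
--     for i, char in enumerate(param_str):
--         if char in ('"', "'"):
--             if not in_quotes:
--                 in_quotes = True
--                 quote_char = char
--             elif char == quote_char:
--                 in_quotes = False
--         elif char == ',' and not in_quotes:
--             splits.append(i)
--     result = []
--     start = 0
--     for i in splits: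
--         result.append(param_str[start:i].strip())
--         start = i + 1
--     last = param_str[start:]
--     if last:
--         result.append(last.strip())
--     return result
-- ===== Notes on version B (the rewrite author's own statement) =====
-- stated objective: alternative
-- what changed: Instead of accumulating the current field character by character, B's scan only records the indices of unquoted commas and a second phase slices the original string between consecutive split points, stripping each segment and guarding only the trailing one.
import Mathlib
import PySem

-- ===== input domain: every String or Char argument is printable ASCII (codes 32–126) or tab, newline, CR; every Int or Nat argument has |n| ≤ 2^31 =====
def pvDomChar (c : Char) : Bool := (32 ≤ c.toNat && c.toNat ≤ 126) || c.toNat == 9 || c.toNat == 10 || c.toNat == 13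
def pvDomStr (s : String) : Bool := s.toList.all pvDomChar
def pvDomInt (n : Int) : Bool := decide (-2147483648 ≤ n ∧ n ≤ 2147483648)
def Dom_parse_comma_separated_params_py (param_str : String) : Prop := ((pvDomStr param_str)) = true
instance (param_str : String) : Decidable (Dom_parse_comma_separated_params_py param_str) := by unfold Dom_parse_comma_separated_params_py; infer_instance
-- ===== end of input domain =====

-- B records the indices of unquoted commas in one scan and then slices the string between them,
-- instead of accumulating the current field character by character (objective: alternative decomposition).

-- ===== PORT A =====
-- the for-loop of A: state (result, current, in_quotes, quote_char)
def pvALoop : List Char → List String → List Char → Bool → Option Char → List String × List Char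
  | [], res, cur, _iq, _qc => (res, cur)
  | c :: rest, res, cur, iq, qc =>
    if c = '"' ∨ c = '\'' then
      if iq = false then pvALoop rest res (cur ++ [c]) true (some c)
      else if some c = qc then pvALoop rest res (cur ++ [c]) false qc
      else pvALoop rest res (cur ++ [c]) iq qc
    else if c = ',' ∧ iq = false then
      pvALoop rest (res ++ [String.ofList (PySem.Chars.strip cur)]) [] iq qc
    else pvALoop rest res (cur ++ [c]) iq qc

def parse_comma_separated_params_py (param_str : String) : List String :=
  let rc := pvALoop param_str.toList [] [] false none
  if rc.2 ≠ [] then rc.1 ++ [String.ofList (PySem.Chars.strip rc.2)] else rc.1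

-- ===== PORT B =====
-- first loop of B: over enumerate(param_str), collect indices of unquoted commas
def pvBScan : List (Int × Char) → List Int → Bool → Option Char → List Int
  | [], splits, _iq, _qc => splits
  | (i, c) :: rest, splits, iq, qc =>
    if c = '"' ∨ c = '\'' then
      if iq = false then pvBScan rest splits true (some c)
      else if some c = qc then pvBScan rest splits false qc
      else pvBScan rest splits iq qc
    else if c = ',' ∧ iq = false then pvBScan rest (splits ++ [i]) iq qc
    else pvBScan rest splits iq qc

-- second loop of B over the split indices, plus the trailing-segment guard
def pvBBuild (l : List Char) : List Int → Int → List String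
  | [], start =>
    let last := PySem.List.slice l (some start) none
    if last ≠ [] then [String.ofList (PySem.Chars.strip last)] else []
  | i :: rest, start =>
    String.ofList (PySem.Chars.strip (PySem.List.slice l (some start) (some i))) :: pvBBuild l rest (i + 1)

def parse_comma_separated_params_py_alt (param_str : String) : List String :=
  pvBBuild param_str.toList (pvBScan (PySem.List.enumerate param_str.toList 0) [] false none) 0

-- ===== PRECONDITION & SPEC =====
def Spec_parse_comma_separated_params_py (param_str : String) (out : List String) : Prop := out = parse_comma_separated_params_py_alt param_str
instance (param_str : String) (out : List String) : Decidable (Spec_parse_comma_separated_params_py param_str out) := by unfold Spec_parse_comma_separated_params_py; infer_instance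

-- ===== CLAIM (what is proved, stated in full; the proofs are below) =====
def Claim_equal_parse_comma_separated_params_py : Prop := ∀ (param_str : String), Dom_parse_comma_separated_params_py param_str → Spec_parse_comma_separated_params_py param_str (parse_comma_separated_params_py param_str)

-- ===== LEMMAS AND PROOFS =====

-- proof-only abbreviation for A's trailing-guard finish
def pvAFin (p : List String × List Char) : List String :=
  if p.2 ≠ [] then p.1 ++ [String.ofList (PySem.Chars.strip p.2)] else p.1

lemma pvBScan_acc (xs : List (Int × Char)) (s : List Int) (iq : Bool) (qc : Option Char) :
    pvBScan xs s iq qc = s ++ pvBScan xs [] iq qc := by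
  induction xs generalizing s iq qc with
  | nil => simp [pvBScan]
  | cons p rest ih =>
    obtain ⟨i, c⟩ := p
    simp only [pvBScan]
    split_ifs
    all_goals first
      | exact ih s _ _
      | (rw [ih (s ++ [i]), ih ([] ++ [i])]; simp)

-- A's finish (append stripped current iff nonempty) of the loop on r with current = pre.drop start
-- equals res ++ B's build on the split indices collected from r at offset pre.length.
lemma pvMain (r : List Char) : ∀ (pre : List Char) (start : Nat) (iq : Bool) (qc : Option Char)
    (res : List String), start ≤ pre.length →
    pvAFin (pvALoop r res (pre.drop start) iq qc)
    = res ++ pvBBuild (pre ++ r) (pvBScan (PySem.List.enumerate r (pre.length : Int)) [] iq qc)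
        ((start : Nat) : Int) := by
  induction r with
  | nil =>
    intro pre start iq qc res h
    simp only [pvALoop, PySem.List.enumerate_nil, pvBScan, pvBBuild, List.append_nil,
      PySem.List.slice_from_natCast, pvAFin]
    by_cases he : pre.drop start = [] <;> simp [he]
  | cons c rest ih =>
    intro pre start iq qc res h
    have hdrop : ∀ x : Char, pre.drop start ++ [x] = (pre ++ [x]).drop start := by
      intro x; rw [List.drop_append_of_le_length h]
    have hlen : ∀ x : Char, ((pre ++ [x]).length : Int) = (pre.length : Int) + 1 := by
      intro x; simp
    have hassoc : ∀ x : Char, (pre ++ [x]) ++ rest = pre ++ (x :: rest) := by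
      intro x; simp
    rw [PySem.List.enumerate_cons]
    simp only [pvALoop, pvBScan]
    split_ifs with h1 h2 h3 h4
    · -- quote, not in quotes
      rw [hdrop c, ih (pre ++ [c]) start true (some c) res (by simpa using Nat.le_succ_of_le h),
        hlen, hassoc]
    · -- quote, closing
      rw [hdrop c, ih (pre ++ [c]) start false qc res (by simpa using Nat.le_succ_of_le h),
        hlen, hassoc]
    · -- quote, other quote char inside quotes
      rw [hdrop c, ih (pre ++ [c]) start iq qc res (by simpa using Nat.le_succ_of_le h),
        hlen, hassoc]
    · -- unquoted comma at index pre.length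
      rw [pvBScan_acc]
      have hcur : ([] : List Char) = (pre ++ [c]).drop (pre.length + 1) := by simp
      rw [hcur,
        ih (pre ++ [c]) (pre.length + 1) iq qc
          (res ++ [String.ofList (PySem.Chars.strip (pre.drop start))]) (by simp),
        hlen, hassoc]
      simp only [List.nil_append, List.singleton_append, pvBBuild]
      have hslice : PySem.List.slice (pre ++ c :: rest) (some ((start : Nat) : Int))
          (some ((pre.length : Nat) : Int)) = pre.drop start := by
        rw [PySem.List.slice_natCast, List.drop_append_of_le_length h]
        have hl : (pre.drop start).length = pre.length - start := by simp
        rw [List.take_append_of_le_length (by omega), List.take_of_length_le (by omega)]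
      rw [hslice]
      push_cast
      simp
    · -- ordinary character (or comma inside quotes)
      rw [hdrop c, ih (pre ++ [c]) start iq qc res (by simpa using Nat.le_succ_of_le h),
        hlen, hassoc]

-- ===== VERDICT (by name: the statement is the Claim_ definition above) =====
theorem parse_comma_separated_params_py_spec : Claim_equal_parse_comma_separated_params_py := by
  intro s _
  show _ = _
  have := pvMain s.toList [] 0 false none [] (by simp)
  simpa [parse_comma_separated_params_py, parse_comma_separated_params_py_alt, pvAFin] using this
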